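-- pv_equiv track=rewrite | github.com/riddheshSajwan/data_structures_algorithm | math/powersOf3.py | solve
-- ===== SOURCE A (Python) =====
-- def solve(A):
--     res,fin_res = [],[]
--     while A > 0:
--         res.append(A%3)
--         A //= 3
--     for i in range(len(res)):
--         while res[i] > 0:
--             fin_res.append(pow(3,i))
--             res[i] -= 1
--     return fin_res
-- ===== SOURCE B (Python) =====
-- def solve(A):
--     if A <= 0:
--         return []
--     return [1] * (A % 3) + [3 * x for x in solve(A // 3)]
-- ===== Notes on version B (the rewrite author's own statement) =====
-- stated objective: alternative
-- what changed: B is recursive on A: it emits ones for the units digit and scales the whole recursive result of the quotient by three via a map, so there is no digit list, no power accumulator and no index loop, unlike A's two staged passes over a materialized base-three digit array.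
import Mathlib
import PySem

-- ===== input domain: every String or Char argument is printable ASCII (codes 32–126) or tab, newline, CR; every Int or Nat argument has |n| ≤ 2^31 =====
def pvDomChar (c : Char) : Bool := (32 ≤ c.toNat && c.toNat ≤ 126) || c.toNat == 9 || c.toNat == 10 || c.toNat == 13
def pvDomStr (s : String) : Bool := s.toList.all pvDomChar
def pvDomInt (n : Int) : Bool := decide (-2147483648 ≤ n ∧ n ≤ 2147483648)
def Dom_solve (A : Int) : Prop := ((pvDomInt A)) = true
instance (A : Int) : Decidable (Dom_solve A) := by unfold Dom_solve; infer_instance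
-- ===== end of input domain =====

-- B recurses on A, emitting [1]*(A%3) and scaling the recursive result for A//3 by 3; A stages two passes over a materialized base-3 digit list.

-- termination helper for the loops/recursions (A //= 3 strictly decreases a positive A)
theorem floordiv3_toNat_lt (A : Int) (h : A > 0) :
    (PySem.Int.floordiv A 3).toNat < A.toNat := by
  have h1 : PySem.Int.floordiv A 3 < A :=
    (PySem.Int.floordiv_lt_iff_lt_mul (a := A) (b := 3) (q := A) (by norm_num)).mpr (by omega)
  have h2 : (0 : Int) ≤ PySem.Int.floordiv A 3 :=
    (PySem.Int.le_floordiv_iff_mul_le (a := A) (b := 3) (q := 0) (by norm_num)).mpr (by omega)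
  omega

-- ===== PORT A =====
-- first while-loop: collect base-3 digits of A (res)
def solveDigits (A : Int) : List Int :=
  if A > 0 then PySem.Int.mod A 3 :: solveDigits (PySem.Int.floordiv A 3) else []
termination_by A.toNat
decreasing_by exact floordiv3_toNat_lt A (by assumption)

-- inner while-loop: append pow(3,i) while res[i] > 0, decrementing
def innerLoop (v p : Int) (acc : List Int) : List Int :=
  if v > 0 then innerLoop (v - 1) p (acc ++ [p]) else acc
termination_by v.toNat
decreasing_by omega

def solve (A : Int) : List Int :=
  let res := solveDigits A
  (List.range res.length).foldl (fun acc i => innerLoop (res.getD i 0) ((3 : Int) ^ i) acc) []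

-- ===== PORT B =====
def solve_alt (A : Int) : List Int :=
  if h : A ≤ 0 then []
  else List.replicate (PySem.Int.mod A 3).toNat 1
        ++ (solve_alt (PySem.Int.floordiv A 3)).map (fun x => 3 * x)
termination_by A.toNat
decreasing_by exact floordiv3_toNat_lt A (by omega)

-- ===== PRECONDITION & SPEC =====
def Spec_solve (A : Int) (out : List Int) : Prop := out = solve_alt A
instance (A : Int) (out : List Int) : Decidable (Spec_solve A out) := by unfold Spec_solve; infer_instance

-- ===== CLAIM (what is proved, stated in full; the proofs are below) =====
def Claim_equal_solve : Prop := ∀ (A : Int), Dom_solve A → Spec_solve A (solve A)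

-- ===== LEMMAS AND PROOFS =====

-- proof-side: the common value both programs compute from the digit list
def rep : List Int → Int → List Int
  | [], _ => []
  | d :: ds, p => List.replicate d.toNat p ++ rep ds (p * 3)

theorem innerLoop_eq (v p : Int) (acc : List Int) :
    innerLoop v p acc = acc ++ List.replicate v.toNat p := by
  rw [innerLoop]
  split_ifs with h
  · rw [innerLoop_eq (v - 1)]
    have hv : v.toNat = (v - 1).toNat + 1 := by omega
    rw [hv, List.replicate_succ]
    simp
  · have hv : v.toNat = 0 := by omega
    simp [hv]
termination_by v.toNat
decreasing_by omega

theorem rep_concat (ds : List Int) (d p : Int) :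
    rep (ds ++ [d]) p = rep ds p ++ List.replicate d.toNat (p * 3 ^ ds.length) := by
  induction ds generalizing p with
  | nil => simp [rep]
  | cons a as ih =>
    have hp : p * 3 * 3 ^ as.length = p * 3 ^ (as.length + 1) := by ring
    simp only [List.cons_append, rep, ih, List.length_cons, hp, List.append_assoc]

theorem outer_eq (res : List Int) (acc : List Int) :
    (List.range res.length).foldl (fun acc i => innerLoop (res.getD i 0) ((3 : Int) ^ i) acc) acc
      = acc ++ rep res 1 := by
  induction res using List.reverseRecOn generalizing acc with
  | nil => simp [rep]
  | append_singleton ds d ih =>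
    rw [List.length_append, List.length_singleton, List.range_succ, List.foldl_append]
    have hcongr : (List.range ds.length).foldl
        (fun acc i => innerLoop ((ds ++ [d]).getD i 0) ((3 : Int) ^ i) acc) acc
        = (List.range ds.length).foldl
        (fun acc i => innerLoop (ds.getD i 0) ((3 : Int) ^ i) acc) acc := by
      apply PySem.List.foldl_congr_mem
      intro acc i hi
      rw [List.getD_append _ _ _ _ (List.mem_range.mp hi)]
    rw [hcongr, ih]
    simp only [List.foldl_cons, List.foldl_nil]
    have hd : (ds ++ [d]).getD ds.length 0 = d := by
      simp [List.getD]
    rw [hd, innerLoop_eq, rep_concat, one_mul, List.append_assoc]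

-- scaling a rep by 3 is the same as starting the power one step higher
theorem rep_map_mul (ds : List Int) (p : Int) :
    (rep ds p).map (fun x => 3 * x) = rep ds (3 * p) := by
  induction ds generalizing p with
  | nil => simp [rep]
  | cons d tl ih =>
    simp only [rep, List.map_append, List.map_replicate, ih]
    rw [mul_assoc]

theorem solve_alt_eq_rep (A : Int) : solve_alt A = rep (solveDigits A) 1 := by
  rw [solve_alt, solveDigits]
  split_ifs with h h2
  · omega
  · simp [rep]
  · rw [solve_alt_eq_rep (PySem.Int.floordiv A 3), rep_map_mul]
    simp [rep]
  · omega
termination_by A.toNat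
decreasing_by exact floordiv3_toNat_lt A (by omega)

-- ===== VERDICT (by name: the statement is the Claim_ definition above) =====
theorem solve_spec : Claim_equal_solve := by
  intro A _
  unfold Spec_solve solve
  rw [outer_eq, solve_alt_eq_rep]
  simp
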